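-- pv_equiv track=rewrite | github.com/Afeks214/Lorenzian-Educlidian- | tests/ai_generation/test_suite_health_reporter.py | _calculate_duplicate_code_penalty
-- ===== SOURCE A (Python) =====
-- from typing import Dict, List, Any, Optional
-- from collections import defaultdict, deque
--
-- def _calculate_duplicate_code_penalty(tests: List[Dict[str, Any]]) -> float:
--     """Calculate penalty for duplicate code"""
--     # Simplified duplicate detection - in real implementation would use AST analysis
--     test_patterns = defaultdict(int)
--
--     for test in tests:
--         # Simple pattern based on test structure
--         pattern = f"{test.get('setup_type', '')}-{test.get('test_type', '')}"
--         test_patterns[pattern] += 1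
--
--     # Calculate penalty based on duplicates
--     penalty = 0
--     for pattern, count in test_patterns.items():
--         if count > 3:  # More than 3 similar tests
--             penalty += (count - 3) * 2
--
--     return min(30, penalty)  # Cap at 30 points
-- ===== SOURCE B (Python) =====
-- from typing import Dict, List, Any, Optional
--
--
-- def _calculate_duplicate_code_penalty(tests: List[Dict[str, Any]]) -> float:
--     """Calculate penalty for duplicate code (single fused pass)."""
--     counts = {}
--     penalty = 0
--     for test in tests:
--         pattern = f"{test.get('setup_type', '')}-{test.get('test_type', '')}"
--         c = counts.get(pattern, 0) + 1
--         counts[pattern] = c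
--         if c > 3:
--             penalty += 2
--     return min(30, penalty)
-- ===== Notes on version B (the rewrite author's own statement) =====
-- stated objective: simpler
-- what changed: Replaces the two-pass build-a-counter-then-iterate-items aggregation by a single fused pass that keeps a running count per pattern and adds 2 to the penalty whenever a pattern's count exceeds 3, eliminating the second loop over the dict items.
import Mathlib
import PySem

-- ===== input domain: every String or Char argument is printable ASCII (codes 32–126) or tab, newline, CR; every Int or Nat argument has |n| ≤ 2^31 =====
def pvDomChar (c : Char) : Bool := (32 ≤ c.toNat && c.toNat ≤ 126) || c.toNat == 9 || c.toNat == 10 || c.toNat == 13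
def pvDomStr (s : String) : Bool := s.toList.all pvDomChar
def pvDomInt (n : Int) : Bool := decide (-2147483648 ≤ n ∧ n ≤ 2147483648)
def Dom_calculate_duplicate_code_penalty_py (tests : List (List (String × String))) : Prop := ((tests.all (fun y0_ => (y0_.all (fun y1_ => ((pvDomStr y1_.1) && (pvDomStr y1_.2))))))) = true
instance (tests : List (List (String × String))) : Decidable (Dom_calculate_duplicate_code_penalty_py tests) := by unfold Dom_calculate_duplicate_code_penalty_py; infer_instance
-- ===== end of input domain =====

-- B fuses A's two passes (build a pattern counter, then iterate its items) into one pass that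
-- keeps a running count per pattern and adds 2 to the penalty each time a count exceeds 3.

-- ===== PORT A =====
-- pattern = f"{test.get('setup_type', '')}-{test.get('test_type', '')}"  (shared by both Pythons)
def pvPattern (test : List (String × String)) : String :=
  (PySem.Dict.getD (PySem.Dict.mk test) "setup_type" "") ++ "-" ++
    (PySem.Dict.getD (PySem.Dict.mk test) "test_type" "")

def calculate_duplicate_code_penalty_py (tests : List (List (String × String))) : Int :=
  -- test_patterns = defaultdict(int); for test in tests: test_patterns[pattern] += 1
  let test_patterns : PySem.Dict String Int :=
    tests.foldl (fun d test => d.modify (pvPattern test) 0 (· + 1)) PySem.Dict.empty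
  -- penalty = 0; for pattern, count in test_patterns.items(): if count > 3: penalty += (count - 3) * 2
  let penalty : Int :=
    test_patterns.items.foldl (fun penalty pc => if pc.2 > 3 then penalty + (pc.2 - 3) * 2 else penalty) 0
  min 30 penalty

-- ===== PORT B =====
def calculate_duplicate_code_penalty_py_alt (tests : List (List (String × String))) : Int :=
  -- counts = {}; penalty = 0; one pass: c = counts.get(pattern, 0) + 1; counts[pattern] = c; if c > 3: penalty += 2
  let st : PySem.Dict String Int × Int :=
    tests.foldl (fun st test =>
      let pattern := pvPattern test
      let c := st.1.getD pattern 0 + 1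
      (st.1.insert pattern c, if c > 3 then st.2 + 2 else st.2)) (PySem.Dict.empty, 0)
  min 30 st.2

-- ===== PRECONDITION & SPEC =====
def Spec_calculate_duplicate_code_penalty_py (tests : List (List (String × String))) (out : Int) : Prop := out = calculate_duplicate_code_penalty_py_alt tests
instance (tests : List (List (String × String))) (out : Int) : Decidable (Spec_calculate_duplicate_code_penalty_py tests out) := by unfold Spec_calculate_duplicate_code_penalty_py; infer_instance

-- ===== CLAIM (what is proved, stated in full; the proofs are below) =====
def Claim_equal_calculate_duplicate_code_penalty_py : Prop := ∀ (tests : List (List (String × String))), Dom_calculate_duplicate_code_penalty_py tests → Spec_calculate_duplicate_code_penalty_py tests (calculate_duplicate_code_penalty_py tests)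

-- ===== LEMMAS AND PROOFS =====

-- B's loop body, named for the proof
def pvStep (st : PySem.Dict String Int × Int) (x : String) : PySem.Dict String Int × Int :=
  let c := st.1.getD x 0 + 1
  (st.1.insert x c, if c > 3 then st.2 + 2 else st.2)

-- per-pattern penalty contribution, as a function of its final count
def pvPen (c : Int) : Int := if c > 3 then (c - 3) * 2 else 0

-- total penalty before the cap, as a function of the pattern list
def pvG (xs : List String) : Int :=
  ((PySem.Set.ofList xs).map (fun k => pvPen ((xs.count k : Nat) : Int))).sum

theorem pvPen_succ (c : Int) : pvPen (c + 1) = pvPen c + (if c + 1 > 3 then 2 else 0) := by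
  unfold pvPen; split_ifs <;> omega

theorem pvSum_update (l : List String) (f g : String → Int) (x : String)
    (hnd : l.Nodup) (hx : x ∈ l) (hfg : ∀ k ∈ l, k ≠ x → g k = f k) :
    (l.map g).sum = (l.map f).sum + (g x - f x) := by
  induction l with
  | nil => cases hx
  | cons a l ih =>
    rcases List.mem_cons.mp hx with rfl | hx'
    · have : ∀ k ∈ l, g k = f k := fun k hk =>
        hfg k (List.mem_cons_of_mem _ hk) (fun h => (List.nodup_cons.mp hnd).1 (h ▸ hk))
      simp [List.map_congr_left this]; ring
    · have ha : g a = f a := hfg a (List.mem_cons_self) (fun h => (List.nodup_cons.mp hnd).1 (h ▸ hx'))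
      have := ih (List.nodup_cons.mp hnd).2 hx' (fun k hk hne => hfg k (List.mem_cons_of_mem _ hk) hne)
      simp [ha, this]; ring

theorem pvG_append (xs : List String) (x : String) :
    pvG (xs ++ [x]) = pvG xs + (if ((xs.count x : Nat) : Int) + 1 > 3 then 2 else 0) := by
  have hset : PySem.Set.ofList (xs ++ [x]) = PySem.Set.add (PySem.Set.ofList xs) x := by
    rw [PySem.Set.ofList_eq_foldl, List.foldl_append, ← PySem.Set.ofList_eq_foldl]
    rfl
  have hcount : ∀ k : String, (xs ++ [x]).count k = xs.count k + if x = k then 1 else 0 := by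
    intro k; simp [List.count_append, List.count_singleton, beq_iff_eq]
  by_cases hx : x ∈ xs
  · have hxset : x ∈ PySem.Set.ofList xs := (PySem.Set.mem_ofList xs x).mpr hx
    have hadd : PySem.Set.add (PySem.Set.ofList xs) x = PySem.Set.ofList xs := by
      unfold PySem.Set.add; rw [if_pos ((PySem.Set.contains_iff _ x).mpr hxset)]
    rw [pvG, hset, hadd]
    rw [pvSum_update (PySem.Set.ofList xs)
          (fun k => pvPen ((xs.count k : Nat) : Int))
          (fun k => pvPen (((xs ++ [x]).count k : Nat) : Int)) x
          (PySem.Set.nodup_ofList xs) hxset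
          (by intro k hk hne; simp [hcount k, Ne.symm hne])]
    have hxx : (((xs ++ [x]).count x : Nat) : Int) = ((xs.count x : Nat) : Int) + 1 := by
      rw [hcount x]; simp
    simp only [pvG, hxx, pvPen_succ]
    ring
  · have hxset : x ∉ PySem.Set.ofList xs := fun h => hx ((PySem.Set.mem_ofList xs x).mp h)
    have hadd : PySem.Set.add (PySem.Set.ofList xs) x = PySem.Set.ofList xs ++ [x] := by
      unfold PySem.Set.add
      rw [if_neg (fun h => hxset ((PySem.Set.contains_iff _ x).mp h))]
    have hc0 : xs.count x = 0 := List.count_eq_zero.mpr hx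
    rw [pvG, hset, hadd]
    rw [List.map_append, List.sum_append]
    have hold : ∀ k ∈ PySem.Set.ofList xs,
        pvPen (((xs ++ [x]).count k : Nat) : Int) = pvPen ((xs.count k : Nat) : Int) := by
      intro k hk
      have hne : x ≠ k := fun h => hxset (h ▸ hk)
      rw [hcount k]; simp [hne]
    rw [List.map_congr_left hold]
    simp [pvG, hc0, pvPen]

-- A's pipeline computes min 30 (pvG patterns)
theorem pvA_eq (tests : List (List (String × String))) :
    calculate_duplicate_code_penalty_py tests = min 30 (pvG (tests.map pvPattern)) := by
  show min 30
      ((tests.foldl (fun d test => d.modify (pvPattern test) 0 (· + 1)) PySem.Dict.empty).items.foldl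
        (fun penalty pc => if pc.2 > 3 then penalty + (pc.2 - 3) * 2 else penalty) 0)
      = min 30 (pvG (tests.map pvPattern))
  have hdict : tests.foldl (fun d test => d.modify (pvPattern test) 0 (· + 1)) PySem.Dict.empty
      = PySem.Dict.counter (tests.map pvPattern) := by
    rw [PySem.Dict.counter_eq_foldl, List.foldl_map]
  have hstep : (fun (penalty : Int) (pc : String × Int) =>
        if pc.2 > 3 then penalty + (pc.2 - 3) * 2 else penalty)
      = fun p pc => p + pvPen pc.2 := by
    funext p pc; unfold pvPen; split_ifs <;> ring
  rw [hdict, hstep, PySem.List.foldl_add, PySem.Dict.items_counter, List.map_map]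
  simp [pvG, Function.comp_def]

-- B's fused loop, over the pattern list, carrying the counter and the running penalty
theorem pvBloop (xs : List String) :
    xs.foldl pvStep (PySem.Dict.empty, 0) = (PySem.Dict.counter xs, pvG xs) := by
  induction xs using List.reverseRecOn with
  | nil => rfl
  | append_singleton xs x ih =>
    rw [List.foldl_append, ih]
    simp only [List.foldl_cons, List.foldl_nil]
    rw [PySem.Dict.counter_append_singleton, pvG_append]
    show ((PySem.Dict.counter xs).insert x ((PySem.Dict.counter xs).getD x 0 + 1),
        if (PySem.Dict.counter xs).getD x 0 + 1 > 3 then pvG xs + 2 else pvG xs) = _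
    rw [show ((PySem.Dict.counter xs).modify x 0 (· + 1))
        = (PySem.Dict.counter xs).insert x ((PySem.Dict.counter xs).getD x 0 + 1) from rfl]
    rw [PySem.Dict.getD_counter, Prod.mk.injEq]
    exact ⟨rfl, by split_ifs <;> simp_all⟩

theorem pvB_eq (tests : List (List (String × String))) :
    calculate_duplicate_code_penalty_py_alt tests = min 30 (pvG (tests.map pvPattern)) := by
  show min 30 ((tests.foldl (fun st test => pvStep st (pvPattern test)) (PySem.Dict.empty, 0)).2)
      = min 30 (pvG (tests.map pvPattern))
  rw [← List.foldl_map, pvBloop]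

-- ===== VERDICT (by name: the statement is the Claim_ definition above) =====
theorem calculate_duplicate_code_penalty_py_spec : Claim_equal_calculate_duplicate_code_penalty_py := by
  intro tests _
  unfold Spec_calculate_duplicate_code_penalty_py
  rw [pvA_eq, pvB_eq]
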